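-- pv_equiv track=rewrite | github.com/ChawlaAvi/ai-engineering-hub | crewai-langwatch-demo/adapters/crew_adapter.py | _extract_customer_id
-- ===== SOURCE A (Python) =====
-- from typing import Dict, Any, List, Optional, Union
--
-- def _extract_customer_id(messages: List[Dict[str, Any]]) -> str:
--     """Extract customer ID from conversation context or generate one."""
--     # Look for customer ID in previous messages or context
--     for msg in messages:
--         if isinstance(msg.get('content'), str):
--             content = msg['content'].lower()
--             if 'customer id' in content or 'cust' in content:
--                 # Simple extraction - in real implementation, use more sophisticated parsing
--                 words = content.split()
--                 for i, word in enumerate(words):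
--                     if 'cust' in word and i + 1 < len(words):
--                         return words[i + 1]
--
--     # Generate a default customer ID
--     return "CUST001"
-- ===== SOURCE B (Python) =====
-- def _extract_customer_id(messages):
--     """Extract customer ID from conversation context or generate one."""
--     for msg in messages:
--         content = msg.get('content')
--         if isinstance(content, str):
--             # single character pass: no word list is built; 'pending' means the
--             # previous word contained 'cust', so the current word is the answer
--             pending = False
--             token = []
--             for ch in content.lower():
--                 if ch.isspace():
--                     if token:
--                         word = ''.join(token)
--                         if pending:
--                             return word
--                         pending = 'cust' in word
--                         token = []
--                 else:
--                     token.append(ch)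
--             if pending and token:
--                 return ''.join(token)
--     return "CUST001"
-- ===== Notes on version B (the rewrite author's own statement) =====
-- stated objective: alternative
-- what changed: B replaces A's substring guard + split() + enumerate-with-index scan by a single character pass per message that builds the current word on the fly and carries a 'previous word contained cust' flag, never materialising the word list or indexing into it.
import Mathlib
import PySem

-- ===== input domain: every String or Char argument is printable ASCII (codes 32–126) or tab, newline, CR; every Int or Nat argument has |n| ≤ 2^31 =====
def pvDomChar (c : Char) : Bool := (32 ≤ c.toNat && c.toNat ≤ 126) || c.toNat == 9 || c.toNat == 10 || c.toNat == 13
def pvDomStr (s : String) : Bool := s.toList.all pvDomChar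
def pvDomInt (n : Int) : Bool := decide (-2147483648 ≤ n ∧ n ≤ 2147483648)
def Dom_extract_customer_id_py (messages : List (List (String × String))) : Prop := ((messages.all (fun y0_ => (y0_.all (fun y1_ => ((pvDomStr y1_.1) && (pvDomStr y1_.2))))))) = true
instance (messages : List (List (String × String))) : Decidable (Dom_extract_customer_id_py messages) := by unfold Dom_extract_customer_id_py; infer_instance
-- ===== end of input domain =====

-- B replaces A's guard + split() + enumerate-indexed scan by a single character pass per
-- message that tracks the current word and a 'previous word contained cust' flag (alternative).


-- ===== PORT A =====
-- the chars of the Python literals 'cust' and 'customer id' (= pvCust, pvCustomerId)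
def pvCust : List Char := ['c', 'u', 's', 't']
def pvCustomerId : List Char := ['c', 'u', 's', 't', 'o', 'm', 'e', 'r', ' ', 'i', 'd']
-- inner loop: for i, word in enumerate(words): if 'cust' in word and i+1 < len(words): return words[i+1]
-- (pyGet? is in range whenever the guard holds, so the 'some' it returns is Python's words[i+1])
def pvAInner (words : List (List Char)) : List (Int × List Char) → Option (List Char)
  | [] => none
  | (i, w) :: rest =>
    if PySem.Chars.isIn pvCust w && decide (i + 1 < (words.length : Int)) then
      PySem.List.pyGet? words (i + 1)
    else pvAInner words rest

-- the body run for one message whose 'content' is a str (chars of that string)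
def pvAMsg (content : List Char) : Option (List Char) :=
  let c := PySem.Chars.lower content
  if PySem.Chars.isIn pvCustomerId c || PySem.Chars.isIn pvCust c then
    let words := PySem.Chars.split₀ c
    pvAInner words (PySem.List.enumerate words 0)
  else none

def extract_customer_id_py (messages : List (List (String × String))) : String :=
  match messages with
  | [] => "CUST001"
  | msg :: rest =>
    match PySem.Dict.get? (PySem.Dict.mk msg) "content" with
    | some content =>
      match pvAMsg content.toList with
      | some w => String.ofList w
      | none => extract_customer_id_py rest
    | none => extract_customer_id_py rest

-- ===== PORT B =====
-- the character pass of Source B: 'pending' = previous word contained 'cust', 'token' = current word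
-- (''.join over a list of single characters is that character list)
def pvBGo (cs : List Char) (pending : Bool) (token : List Char) : Option (List Char) :=
  match cs with
  | [] => if pending && !token.isEmpty then some token else none
  | c :: rest =>
    if PySem.Chars.isspace c then
      if token.isEmpty then pvBGo rest pending token
      else if pending then some token
      else pvBGo rest (PySem.Chars.isIn pvCust token) []
    else pvBGo rest pending (token ++ [c])

def pvBMsg (content : List Char) : Option (List Char) :=
  pvBGo (PySem.Chars.lower content) false []

def extract_customer_id_py_alt (messages : List (List (String × String))) : String :=
  match messages with
  | [] => "CUST001"
  | msg :: rest =>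
    match PySem.Dict.get? (PySem.Dict.mk msg) "content" with
    | some content =>
      match pvBMsg content.toList with
      | some w => String.ofList w
      | none => extract_customer_id_py_alt rest
    | none => extract_customer_id_py_alt rest

-- ===== PRECONDITION & SPEC =====
def Spec_extract_customer_id_py (messages : List (List (String × String))) (out : String) : Prop := out = extract_customer_id_py_alt messages
instance (messages : List (List (String × String))) (out : String) : Decidable (Spec_extract_customer_id_py messages out) := by unfold Spec_extract_customer_id_py; infer_instance

-- ===== CLAIM (what is proved, stated in full; the proofs are below) =====
def Claim_equal_extract_customer_id_py : Prop := ∀ (messages : List (List (String × String))), Dom_extract_customer_id_py messages → Spec_extract_customer_id_py messages (extract_customer_id_py messages)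

-- ===== LEMMAS AND PROOFS =====

-- word-level view both per-message computations reduce to: return the word after the first
-- word containing 'cust' ('pending' carries 'the previous word contained cust')
def pvWFind : Bool → List (List Char) → Option (List Char)
  | _, [] => none
  | pending, w :: rest =>
    if pending then some w else pvWFind (PySem.Chars.isIn pvCust w) rest

theorem pvSplitGo_acc (cs : List Char) : ∀ (cur : List Char) (acc : List (List Char)),
    PySem.Chars.split₀.go cs cur acc = acc.reverse ++ PySem.Chars.split₀.go cs cur [] := by
  induction cs with
  | nil => intro cur acc; simp [PySem.Chars.split₀.go]; split_ifs <;> simp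
  | cons c rest ih =>
    intro cur acc
    simp only [PySem.Chars.split₀.go]
    split_ifs with h1 h2
    · exact ih [] acc
    · rw [ih [] (cur.reverse :: acc), ih [] [cur.reverse]]; simp
    · exact ih (c :: cur) acc

theorem pvBGo_eq_wfind (cs : List Char) : ∀ (pending : Bool) (token : List Char),
    pvBGo cs pending token = pvWFind pending (PySem.Chars.split₀.go cs token.reverse []) := by
  induction cs with
  | nil =>
    intro pending token
    cases token with
    | nil => cases pending <;> simp [pvBGo, PySem.Chars.split₀.go, pvWFind]
    | cons t ts => cases pending <;> simp [pvBGo, PySem.Chars.split₀.go, pvWFind]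
  | cons c rest ih =>
    intro pending token
    simp only [pvBGo, PySem.Chars.split₀.go]
    by_cases hsp : PySem.Chars.isspace c
    · simp only [hsp, if_true]
      cases token with
      | nil => simpa using ih pending []
      | cons t ts =>
        have h2 : ((ts.reverse ++ [t]).isEmpty) = false := by simp
        simp only [List.isEmpty_cons, List.reverse_cons, h2, Bool.false_eq_true, if_false,
          pvSplitGo_acc rest [] [(ts.reverse ++ [t]).reverse]]
        cases pending with
        | true => simp [pvWFind]
        | false =>
          have := ih (PySem.Chars.isIn pvCust (t :: ts)) []
          simp only [List.reverse_nil] at this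
          simp [pvWFind, this]
    · simp only [hsp]
      rw [ih pending (token ++ [c])]
      simp

theorem pvAInner_eq_wfind (suf : List (List Char)) : ∀ (pre : List (List Char)),
    pvAInner (pre ++ suf) (PySem.List.enumerate suf (pre.length : Int)) = pvWFind false suf := by
  induction suf with
  | nil => intro pre; simp [PySem.List.enumerate, pvAInner, pvWFind]
  | cons w rest ih =>
    intro pre
    simp only [PySem.List.enumerate, pvAInner]
    by_cases hc : PySem.Chars.isIn pvCust w = true
    · cases rest with
      | nil =>
        simp [hc, PySem.List.enumerate, pvAInner, pvWFind]
      | cons r rest' =>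
        have hget : PySem.List.pyGet? (pre ++ w :: r :: rest') ((pre.length : Int) + 1)
            = some r := by
          have hcast : ((pre.length : Int) + 1) = ((pre.length + 1 : Nat) : Int) := by
            push_cast; ring
          rw [hcast, PySem.List.pyGet?_natCast]
          rw [List.getElem?_append_right (by omega)]
          simp
        simp [hc, hget, pvWFind]
    · have hc' : PySem.Chars.isIn pvCust w = false := by
        cases h : PySem.Chars.isIn pvCust w
        · rfl
        · exact absurd h hc
      have hih := ih (pre ++ [w])
      simp only [List.append_assoc, List.cons_append, List.nil_append, List.length_append,
        List.length_cons, List.length_nil] at hih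
      simp only [hc', Bool.false_and, pvWFind]
      rw [show ((pre.length : Int) + 1) = (((pre.length + 1 : Nat)) : Int) by push_cast; ring]
      simpa [pvWFind] using hih

-- every word produced by split() is an infix of the input
theorem pvSplitGo_infix (cs : List Char) : ∀ (cur : List Char) (acc : List (List Char))
    (w : List Char), w ∈ PySem.Chars.split₀.go cs cur acc →
    w ∈ acc ∨ w <:+: (cur.reverse ++ cs) := by
  induction cs with
  | nil =>
    intro cur acc w hw
    simp only [PySem.Chars.split₀.go] at hw
    split_ifs at hw with h
    · exact Or.inl (by simpa using hw)
    · rcases (by simpa using hw : w ∈ acc ∨ w = cur.reverse) with h1 | h1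
      · exact Or.inl h1
      · exact Or.inr (by simp [h1])
  | cons c rest ih =>
    intro cur acc w hw
    simp only [PySem.Chars.split₀.go] at hw
    split_ifs at hw with h1 h2
    · rcases ih [] acc w hw with h | h
      · exact Or.inl h
      · exact Or.inr (h.trans (by simp; exact ⟨cur.reverse ++ [c], [], by simp⟩))
    · rcases ih [] (cur.reverse :: acc) w hw with h | h
      · rcases List.mem_cons.mp h with h3 | h3
        · exact Or.inr (by subst h3; exact ⟨[], c :: rest, by simp⟩)
        · exact Or.inl h3
      · exact Or.inr (h.trans ⟨cur.reverse ++ [c], [], by simp⟩)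
    · rcases ih (c :: cur) acc w hw with h | h
      · exact Or.inl h
      · exact Or.inr (by simpa using h)

theorem pvWFind_none (ws : List (List Char))
    (h : ∀ w ∈ ws, PySem.Chars.isIn pvCust w = false) :
    pvWFind false ws = none := by
  induction ws with
  | nil => rfl
  | cons w rest ih =>
    simp only [pvWFind, Bool.false_eq_true, if_false, h w (by simp)]
    exact ih (fun w' hw' => h w' (by simp [hw']))

theorem pvMsg_eq (content : List Char) : pvAMsg content = pvBMsg content := by
  have hB : pvBMsg content
      = pvWFind false (PySem.Chars.split₀ (PySem.Chars.lower content)) := by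
    rw [pvBMsg, pvBGo_eq_wfind]; rfl
  by_cases hc : PySem.Chars.isIn pvCust (PySem.Chars.lower content) = true
  · rw [pvAMsg, hB]
    simp only [hc, Bool.or_true, if_true]
    have := pvAInner_eq_wfind (PySem.Chars.split₀ (PySem.Chars.lower content)) []
    simpa using this
  · have hcid : PySem.Chars.isIn pvCustomerId (PySem.Chars.lower content) = false := by
      cases h : PySem.Chars.isIn pvCustomerId (PySem.Chars.lower content)
      · rfl
      · exfalso
        apply hc
        rw [PySem.Chars.isIn_iff_infix] at h ⊢
        exact List.IsInfix.trans (by decide) h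
    have hc' : PySem.Chars.isIn pvCust (PySem.Chars.lower content) = false := by
      cases h : PySem.Chars.isIn pvCust (PySem.Chars.lower content)
      · rfl
      · exact absurd h hc
    rw [pvAMsg, hB]
    simp only [hcid, hc', Bool.or_false]
    symm
    apply pvWFind_none
    intro w hw
    cases h : PySem.Chars.isIn pvCust w
    · rfl
    · exfalso
      rcases pvSplitGo_infix (PySem.Chars.lower content) [] [] w hw with h1 | h1
      · simp at h1
      · rw [PySem.Chars.isIn_iff_infix] at h
        have hin : PySem.Chars.isIn pvCust (PySem.Chars.lower content) = true := by
          rw [PySem.Chars.isIn_iff_infix]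
          exact h.trans (by simpa using h1)
        rw [hin] at hc'
        exact absurd hc' (by decide)

theorem pvLoop_eq (messages : List (List (String × String))) :
    extract_customer_id_py messages = extract_customer_id_py_alt messages := by
  induction messages with
  | nil => rfl
  | cons msg rest ih =>
    cases hx : PySem.Dict.get? (PySem.Dict.mk msg) "content" with
    | none =>
      simp only [extract_customer_id_py, extract_customer_id_py_alt, hx]
      exact ih
    | some content =>
      simp only [extract_customer_id_py, extract_customer_id_py_alt, hx, pvMsg_eq]
      cases pvBMsg content.toList with
      | none => exact ih
      | some w => rfl

-- ===== VERDICT (by name: the statement is the Claim_ definition above) =====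
theorem extract_customer_id_py_spec : Claim_equal_extract_customer_id_py := by
  intro messages _
  unfold Spec_extract_customer_id_py
  exact pvLoop_eq messages
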